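-- pv_equiv track=rewrite | github.com/SausageTaste/Marumaru-Helper | code/marumaru.py | img_class_gen
-- ===== SOURCE A (Python) =====
-- def img_class_gen(html_s:str):
--     st_point_i = 0
--     while True:
--         try:
--             head_i = html_s.index("<img", st_point_i)
--             tail_i = html_s.index(">", head_i) + 1
--         except ValueError:
--             break
--         else:
--             st_point_i = tail_i
--             yield html_s[head_i:tail_i]
-- ===== SOURCE B (Python) =====
-- def img_class_gen(html_s: str):
--     # One-pass character state machine: scan for "<img", then collect chars
--     # until the first ">", yielding the collected tag; no repeated .index scans.
--     n = len(html_s)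
--     i = 0
--     buf = None  # None = scanning mode; list = collecting a pending tag body
--     while i < n:
--         if buf is None:
--             if html_s.startswith("<img", i):
--                 buf = []
--                 i += 4
--             else:
--                 i += 1
--         else:
--             c = html_s[i]
--             i += 1
--             if c == ">":
--                 yield "<img" + "".join(buf) + ">"
--                 buf = None
--             else:
--                 buf.append(c)
-- ===== Notes on version B (the rewrite author's own statement) =====
-- stated objective: alternative
-- what changed: Replaced the repeated str.index scans of the while/try loop by a single left-to-right character state machine (scanning vs collecting-a-tag modes) that builds each tag as it passes over it.
import Mathlib
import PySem

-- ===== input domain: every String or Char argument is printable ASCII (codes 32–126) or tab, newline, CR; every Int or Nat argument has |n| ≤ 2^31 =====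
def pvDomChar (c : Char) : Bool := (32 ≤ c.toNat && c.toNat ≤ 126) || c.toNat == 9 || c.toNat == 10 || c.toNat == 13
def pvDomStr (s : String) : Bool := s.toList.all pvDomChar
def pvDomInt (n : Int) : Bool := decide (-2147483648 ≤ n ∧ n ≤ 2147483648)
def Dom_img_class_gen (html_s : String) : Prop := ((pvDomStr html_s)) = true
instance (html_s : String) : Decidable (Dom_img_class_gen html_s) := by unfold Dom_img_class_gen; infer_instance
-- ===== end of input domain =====

-- B replaces A's repeated str.index scans by a single-pass character state machine
-- (scan / collect modes); alternative algorithm, same return value.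


-- ===== PORT A =====
-- the substring "<img" as a char list
def imgTag : List Char := ['<', 'i', 'm', 'g']

-- A's while-True loop: st is st_point_i; fuel bounds the iterations (each step
-- strictly advances st, so length+1 fuel always suffices; see imgLoopA_fuel use).
def imgLoopA (s : List Char) (st : Nat) : Nat → List String
  | 0 => []
  | fuel + 1 =>
    let h := PySem.Chars.findFrom s imgTag (st : Int)      -- html_s.index("<img", st_point_i); -1 = ValueError
    if h = -1 then []
    else
      let t := PySem.Chars.findFrom s ['>'] h              -- html_s.index(">", head_i); -1 = ValueError
      if t = -1 then []
      else String.ofList (PySem.Chars.slice s (some h) (some (t + 1))) :: imgLoopA s (t + 1).toNat fuel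

def img_class_gen (html_s : String) : List String :=
  imgLoopA html_s.toList 0 (html_s.toList.length + 1)

-- ===== PORT B =====
-- B's state machine: scanB = "buf is None" mode, collectB = collecting mode.
mutual
def scanB (l : List Char) : List String :=
  match l with
  | [] => []
  | c :: rest =>
    if PySem.Chars.startswith (c :: rest) imgTag           -- html_s.startswith("<img", i)
    then collectB [] (rest.drop 3)                         -- buf = []; i += 4
    else scanB rest                                        -- i += 1
termination_by l.length
decreasing_by all_goals (simp; try omega)
def collectB (buf : List Char) (l : List Char) : List String :=
  match l with
  | [] => []
  | c :: rest =>
    if c = '>'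
    then String.ofList (imgTag ++ buf ++ ['>']) :: scanB rest  -- yield "<img" + "".join(buf) + ">"
    else collectB (buf ++ [c]) rest                        -- buf.append(c)
termination_by l.length
decreasing_by all_goals simp
end

def img_class_gen_alt (html_s : String) : List String :=
  scanB html_s.toList

-- ===== PRECONDITION & SPEC =====
def Spec_img_class_gen (html_s : String) (out : List String) : Prop := out = img_class_gen_alt html_s
instance (html_s : String) (out : List String) : Decidable (Spec_img_class_gen html_s out) := by unfold Spec_img_class_gen; infer_instance

-- ===== CLAIM (what is proved, stated in full; the proofs are below) =====
def Claim_equal_img_class_gen : Prop := ∀ (html_s : String), Dom_img_class_gen html_s → Spec_img_class_gen html_s (img_class_gen html_s)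

-- ===== LEMMAS AND PROOFS =====

-- If "<img" is nowhere in l, scanB yields nothing.
lemma scanB_nil_of_no_infix (l : List Char) (h : ¬ imgTag <:+: l) : scanB l = [] := by
  induction l with
  | nil => simp [scanB]
  | cons c rest ih =>
    have hsw : ¬ PySem.Chars.startswith (c :: rest) imgTag = true := by
      rw [PySem.Chars.startswith_iff]
      exact fun hp => h hp.isInfix
    rw [scanB, if_neg hsw]
    exact ih (fun hi => h (hi.trans (List.suffix_cons c rest).isInfix))

-- scanB skips positions where "<img" does not start.
lemma scanB_skip (k : Nat) : ∀ (l : List Char), (∀ i < k, ¬ imgTag <+: l.drop i) →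
    scanB l = scanB (l.drop k) := by
  induction k with
  | zero => simp
  | succ k ih =>
    intro l hno
    match l with
    | [] => simp
    | c :: rest =>
      have hsw : ¬ PySem.Chars.startswith (c :: rest) imgTag = true := by
        rw [PySem.Chars.startswith_iff]
        exact fun hp => hno 0 (by omega) (by simpa using hp)
      rw [scanB, if_neg hsw]
      have := ih rest (fun i hi => by
        have := hno (i + 1) (by omega)
        simpa using this)
      simpa using this

-- At a position where "<img" starts, scanB switches to collect mode.
lemma scanB_match (l : List Char) (h : imgTag <+: l) : scanB l = collectB [] (l.drop 4) := by
  obtain ⟨t, rfl⟩ := h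
  have hsw : PySem.Chars.startswith (imgTag ++ t) imgTag = true := by
    rw [PySem.Chars.startswith_iff]; exact ⟨t, rfl⟩
  rw [show imgTag ++ t = '<' :: ('i' :: 'm' :: 'g' :: t) from rfl] at hsw ⊢
  rw [scanB, if_pos hsw]
  rfl

-- If '>' is not in m, collectB yields nothing.
lemma collectB_nil_of_not_mem (m : List Char) : ∀ buf, '>' ∉ m → collectB buf m = [] := by
  induction m with
  | nil => intro buf _; simp [collectB]
  | cons c rest ih =>
    intro buf hmem
    rw [collectB, if_neg (by simp at hmem; exact fun h => hmem.1 h.symm)]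
    exact ih _ (by simp at hmem; exact hmem.2)

-- collectB up to the first '>' at index e.
lemma collectB_spec (m : List Char) : ∀ (e : Nat) (buf : List Char),
    ['>'] <+: m.drop e → (∀ i < e, ¬ ['>'] <+: m.drop i) →
    collectB buf m = String.ofList (imgTag ++ buf ++ m.take (e + 1)) :: scanB (m.drop (e + 1)) := by
  induction m with
  | nil => intro e buf hpre _; simp at hpre
  | cons c rest ih =>
    intro e buf hpre hmin
    match e with
    | 0 =>
      have hc : c = '>' := by
        simp only [List.drop_zero] at hpre
        obtain ⟨t2, ht⟩ := hpre
        exact (List.cons_eq_cons.mp ht).1.symm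
      subst hc
      rw [collectB, if_pos rfl]
      simp
    | e + 1 =>
      have hc : ¬ c = '>' := by
        intro hc
        exact hmin 0 (by omega) (by subst hc; exact ⟨rest, rfl⟩)
      rw [collectB, if_neg hc]
      have := ih (e) (buf ++ [c]) (by simpa using hpre) (fun i hi => by
        have := hmin (i + 1) (by omega)
        simpa using this)
      rw [this]
      simp

lemma imgLoopA_eq_scanB (s : List Char) :
    ∀ (fuel st : Nat), st ≤ s.length → s.length + 1 ≤ fuel + st →
    imgLoopA s st fuel = scanB (s.drop st) := by
  intro fuel
  induction fuel with
  | zero => intro st h1 h2; omega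
  | succ fuel ih =>
    intro st hst hfuel
    by_cases hh : PySem.Chars.findFrom s imgTag (st : Int) = -1
    · simp only [imgLoopA, hh]
      exact (scanB_nil_of_no_infix _
        ((PySem.Chars.findFrom_natCast_eq_neg_one_iff s imgTag st hst).mp hh)).symm
    · obtain ⟨hge, hpre, hmin⟩ := PySem.Chars.findFrom_natCast_spec s imgTag st hst hh
      set j : Nat := (PySem.Chars.findFrom s imgTag (st : Int)).toNat with hjdef
      have hjcast : PySem.Chars.findFrom s imgTag (st : Int) = (j : Int) :=
        (Int.toNat_of_nonneg (le_trans (by positivity) hge)).symm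
      have hstj : st ≤ j := by omega
      obtain ⟨m0, hm0p⟩ := hpre
      have hm0 : s.drop j = imgTag ++ m0 := hm0p.symm
      have hm0' : s.drop (j + 4) = m0 := by
        have : (s.drop j).drop 4 = m0 := by rw [hm0]; rfl
        rwa [List.drop_drop] at this
      have hlen0 : s.length - j = 4 + m0.length := by
        have := congrArg List.length hm0
        simp [imgTag] at this
        omega
      have hjlen : j + 4 ≤ s.length := by omega
      -- B side: skip to j, then enter collect mode
      have hB : scanB (s.drop st) = collectB [] (s.drop (j + 4)) := by
        have hskip := scanB_skip (j - st) (s.drop st) (fun i hi => by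
          rw [List.drop_drop]
          exact hmin (st + i) (by omega) (by omega))
        rw [hskip, List.drop_drop, show st + (j - st) = j from by omega,
          scanB_match (s.drop j) ⟨m0, hm0p⟩, List.drop_drop]
      by_cases ht : PySem.Chars.findFrom s ['>'] (PySem.Chars.findFrom s imgTag (st : Int)) = -1
      · simp only [imgLoopA, hh, ht, if_false]
        rw [hB]
        refine (collectB_nil_of_not_mem _ [] (fun hmem => ?_)).symm
        have hinf : ['>'] <:+: s.drop j := by
          refine (List.singleton_infix_iff _ _).mpr ?_
          rw [hm0]
          exact List.mem_append_right _ (hm0' ▸ hmem)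
        rw [hjcast] at ht
        exact ((PySem.Chars.findFrom_natCast_eq_neg_one_iff s ['>'] j (by omega)).mp ht) hinf
      · rw [hjcast] at ht
        obtain ⟨hget, hpret, hmint⟩ := PySem.Chars.findFrom_natCast_spec s ['>'] j (by omega) ht
        set tn : Nat := (PySem.Chars.findFrom s ['>'] (j : Int)).toNat with htndef
        have htcast : PySem.Chars.findFrom s ['>'] (j : Int) = (tn : Int) :=
          (Int.toNat_of_nonneg (le_trans (by positivity) hget)).symm
        have hjtn : j ≤ tn := by omega
        -- tn is at least j + 4: the four characters of "<img" are not '>'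
        have htn4 : j + 4 ≤ tn := by
          by_contra hlt
          rw [not_le] at hlt
          have hd : s.drop tn = imgTag.drop (tn - j) ++ m0 := by
            have h1 : (s.drop j).drop (tn - j) = s.drop tn := by
              rw [List.drop_drop]; congr 1; omega
            rw [← h1, hm0, List.drop_append_of_le_length (by simp [imgTag]; omega)]
          rcases (show tn - j = 0 ∨ tn - j = 1 ∨ tn - j = 2 ∨ tn - j = 3 from by omega)
            with h|h|h|h <;>
            rw [h] at hd <;> rw [hd] at hpret <;>
            simp [imgTag, List.cons_prefix_cons] at hpret
        set e : Nat := tn - (j + 4) with hedef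
        have hdm : m0.drop e = s.drop tn := by
          rw [← hm0', List.drop_drop]; congr 1; omega
        have hpree : ['>'] <+: m0.drop e := by rw [hdm]; exact hpret
        have hmine : ∀ i < e, ¬ ['>'] <+: m0.drop i := fun i hi => by
          rw [← hm0', List.drop_drop]
          exact hmint (j + 4 + i) (by omega) (by omega)
        have helen : e < m0.length := by
          obtain ⟨q, hq⟩ := hpree
          have := congrArg List.length hq
          simp at this
          omega
        have htnlen : tn < s.length := by omega
        -- evaluate one step of A
        simp only [imgLoopA, if_false, hjcast, htcast, htcast ▸ ht]
        rw [if_neg (show ¬((j : Int) = -1) from by omega),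
          hB, hm0', collectB_spec _ e [] hpree hmine]
        congr 1
        · -- the yielded strings agree
          congr 1
          rw [PySem.Chars.slice_eq_listSlice,
            show (tn : Int) + 1 = ((tn + 1 : Nat) : Int) from by push_cast; ring,
            PySem.List.slice_natCast, hm0,
            show tn + 1 - j = imgTag.length + (e + 1) from by simp [imgTag]; omega,
            List.take_length_add_append]
          simp
        · -- the tails agree
          rw [show ((tn : Int) + 1).toNat = tn + 1 from by omega,
            ih (tn + 1) (by omega) (by omega), ← hm0', List.drop_drop,
            show j + 4 + (e + 1) = tn + 1 from by omega]

-- ===== VERDICT (by name: the statement is the Claim_ definition above) =====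
theorem img_class_gen_spec : Claim_equal_img_class_gen := by
  intro html_s _
  unfold Spec_img_class_gen img_class_gen img_class_gen_alt
  simpa using imgLoopA_eq_scanB html_s.toList (html_s.toList.length + 1) 0 (by omega) (by omega)
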